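-- pv_equiv track=rewrite | github.com/shreeyash-hello/Python-codes | cp problems/smallest subarray sum.py | smallSumSubset
-- ===== SOURCE A (Python) =====
-- def smallSumSubset(data, target, maxVal):
--
--     if target <= 0:
--         return 0
--     elif sum(data) < target:
--         return maxVal
--     elif sum(data) == target:
--         return len(data)
--     elif data[0] >= target:
--         return 1
--
--     elif data[0] < target:
--         return min(smallSumSubset(data[1:], target, maxVal), \
--                    1 + smallSumSubset(data[1:], target - data[0], maxVal))
-- ===== SOURCE B (Python) =====
-- def smallSumSubset(data, target, maxVal):
--     # Same answer as A's slicing recursion, computed instead as a top-down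
--     # memoized DP over (suffix index, remaining target), with suffix sums
--     # precomputed once.
--     n = len(data)
--     suff = [0] * (n + 1)
--     for i in range(n - 1, -1, -1):
--         suff[i] = data[i] + suff[i + 1]
--     memo = {}
--
--     def go(i, t):
--         if t <= 0:
--             return 0
--         key = (i, t)
--         if key in memo:
--             return memo[key]
--         s = suff[i]
--         if s < t:
--             r = maxVal
--         elif s == t:
--             r = n - i
--         elif data[i] >= t:
--             r = 1
--         else:
--             r = min(go(i + 1, t), 1 + go(i + 1, t - data[i]))
--         memo[key] = r
--         return r
--
--     return go(0, target)
-- ===== Notes on version B (the rewrite author's own statement) =====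
-- stated objective: alternative
-- what changed: Replaces the slicing recursion that re-computes sum(data[1:]) at every call with a top-down memoized DP over (suffix index, remaining target) using a precomputed suffix-sum table, returning the identical value.
import Mathlib
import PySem

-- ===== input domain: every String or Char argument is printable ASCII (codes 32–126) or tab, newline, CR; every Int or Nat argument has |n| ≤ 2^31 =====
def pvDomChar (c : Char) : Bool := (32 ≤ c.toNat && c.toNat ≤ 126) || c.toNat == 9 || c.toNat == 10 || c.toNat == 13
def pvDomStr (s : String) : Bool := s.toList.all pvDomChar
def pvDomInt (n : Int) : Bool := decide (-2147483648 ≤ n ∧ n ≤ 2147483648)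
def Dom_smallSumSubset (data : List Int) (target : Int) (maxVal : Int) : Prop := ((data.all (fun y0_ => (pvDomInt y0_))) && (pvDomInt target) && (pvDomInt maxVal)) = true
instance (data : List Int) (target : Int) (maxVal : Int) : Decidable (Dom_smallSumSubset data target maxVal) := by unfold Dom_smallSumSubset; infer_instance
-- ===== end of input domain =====

-- B computes A's recurrence as a top-down memoized DP over (suffix index,
-- remaining target) with suffix sums precomputed once; same value on every input.

-- ===== PORT A =====
-- literal transliteration of the Python recursion (slices become List.drop-style
-- structural recursion on the list; sum(data) is data.sum)
def smallSumSubset (data : List Int) (target : Int) (maxVal : Int) : Int :=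
  if target ≤ 0 then 0
  else if data.sum < target then maxVal
  else if data.sum = target then (data.length : Int)
  else
    match data with
    | [] => 0  -- unreachable: here target > 0 and sum [] = 0 < target was caught above
    | d :: rest =>
      if d ≥ target then 1
      else min (smallSumSubset rest target maxVal) (1 + smallSumSubset rest (target - d) maxVal)

-- ===== PORT B =====
-- suffix-sum table: suff[i] = sum(data[i:]), built back-to-front like Source B's loop
def pvSuff (data : List Int) : List Int :=
  data.foldr (fun d acc => (d + acc.headD 0) :: acc) [0]

-- memoized recursion of Source B's `go`; `fuel` (= n - i at every real call) only
-- makes the recursion total, it never changes the computed value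
def goB (data suff : List Int) (n : Nat) (maxVal : Int) :
    Nat → Nat → Int → PySem.Dict (Nat × Int) Int → Int × PySem.Dict (Nat × Int) Int
  | fuel, i, t, memo =>
    if t ≤ 0 then (0, memo)
    else
      match PySem.Dict.get? memo (i, t) with
      | some v => (v, memo)
      | none =>
        let s := suff.getD i 0
        if s < t then (maxVal, PySem.Dict.insert memo (i, t) maxVal)
        else if s = t then ((n : Int) - (i : Int), PySem.Dict.insert memo (i, t) ((n : Int) - (i : Int)))
        else if data.getD i 0 ≥ t then (1, PySem.Dict.insert memo (i, t) 1)
        else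
          match fuel with
          | 0 => (maxVal, memo)  -- fuel guard, unreachable with fuel = n - i
          | fuel' + 1 =>
            let p1 := goB data suff n maxVal fuel' (i + 1) t memo
            let p2 := goB data suff n maxVal fuel' (i + 1) (t - data.getD i 0) p1.2
            let r := min p1.1 (1 + p2.1)
            (r, PySem.Dict.insert p2.2 (i, t) r)

def smallSumSubset_alt (data : List Int) (target : Int) (maxVal : Int) : Int :=
  (goB data (pvSuff data) data.length maxVal data.length 0 target PySem.Dict.empty).1

-- ===== PRECONDITION & SPEC =====
def Spec_smallSumSubset (data : List Int) (target : Int) (maxVal : Int) (out : Int) : Prop := out = smallSumSubset_alt data target maxVal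
instance (data : List Int) (target : Int) (maxVal : Int) (out : Int) : Decidable (Spec_smallSumSubset data target maxVal out) := by unfold Spec_smallSumSubset; infer_instance

-- ===== CLAIM (what is proved, stated in full; the proofs are below) =====
def Claim_equal_smallSumSubset : Prop := ∀ (data : List Int) (target : Int) (maxVal : Int), Dom_smallSumSubset data target maxVal → Spec_smallSumSubset data target maxVal (smallSumSubset data target maxVal)

-- ===== LEMMAS AND PROOFS =====

-- the memo invariant: every stored value is A's answer for its (index, target) key
def MemoOK (data : List Int) (maxVal : Int) (memo : PySem.Dict (Nat × Int) Int) : Prop :=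
  ∀ i t v, PySem.Dict.get? memo (i, t) = some v → v = smallSumSubset (data.drop i) t maxVal

theorem pvSuff_headD (data : List Int) : (pvSuff data).headD 0 = data.sum := by
  induction data with
  | nil => simp [pvSuff]
  | cons d rest ih => simp [pvSuff] at ih ⊢; omega

theorem pvSuff_getD (data : List Int) : ∀ i, (pvSuff data).getD i 0 = (data.drop i).sum := by
  induction data with
  | nil => intro i; cases i <;> simp [pvSuff]
  | cons d rest ih =>
    intro i
    cases i with
    | zero => simpa [pvSuff] using congrArg (d + ·) (pvSuff_headD rest)
    | succ j => simpa [pvSuff] using ih j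

theorem memoOK_insert (data : List Int) (maxVal : Int) (memo : PySem.Dict (Nat × Int) Int)
    (i : Nat) (t v : Int) (h : MemoOK data maxVal memo)
    (hv : v = smallSumSubset (data.drop i) t maxVal) :
    MemoOK data maxVal (PySem.Dict.insert memo (i, t) v) := by
  intro j u w hw
  rw [PySem.Dict.get?_insert] at hw
  split at hw
  · rename_i heq
    cases hw
    obtain ⟨h1, h2⟩ := Prod.mk.injEq .. ▸ heq
    subst h1; subst h2; exact hv
  · exact h j u w hw

-- A at a suffix with 0 < t < sum(suffix): unfolds to the take/skip recursion
theorem A_step (data : List Int) (i : Nat) (t maxVal : Int)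
    (hi : i < data.length) (ht : 0 < t) (h1 : t < (data.drop i).sum) :
    smallSumSubset (data.drop i) t maxVal =
      if data[i] ≥ t then 1
      else min (smallSumSubset (data.drop (i + 1)) t maxVal)
               (1 + smallSumSubset (data.drop (i + 1)) (t - data[i]) maxVal) := by
  have hcons : data.drop i = data[i] :: data.drop (i + 1) := List.drop_eq_getElem_cons hi
  have hsum : (data[i] :: data.drop (i + 1)).sum = (data.drop i).sum := by rw [hcons]
  rw [smallSumSubset.eq_def, hcons]
  rw [if_neg (by omega), if_neg (by rw [hsum]; omega), if_neg (by rw [hsum]; omega)]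

theorem goB_correct (data : List Int) (maxVal : Int) :
    ∀ fuel i t memo, data.length - i ≤ fuel → MemoOK data maxVal memo →
      (goB data (pvSuff data) data.length maxVal fuel i t memo).1
          = smallSumSubset (data.drop i) t maxVal
        ∧ MemoOK data maxVal (goB data (pvSuff data) data.length maxVal fuel i t memo).2 := by
  intro fuel
  induction fuel with
  | zero =>
    intro i t memo hfuel hmem
    have hi : data.length ≤ i := by omega
    have hdrop : data.drop i = [] := List.drop_eq_nil_of_le hi
    rw [goB]
    by_cases ht : t ≤ 0
    · simp only [ht, if_true]
      exact ⟨by rw [smallSumSubset.eq_def]; simp [ht], hmem⟩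
    · simp only [ht, if_false]
      cases hget : PySem.Dict.get? memo (i, t) with
      | some v => exact ⟨hmem i t v hget, hmem⟩
      | none =>
        have hs : (pvSuff data).getD i 0 = 0 := by rw [pvSuff_getD, hdrop]; simp
        rw [hs, if_pos (by omega)]
        have hval : smallSumSubset (data.drop i) t maxVal = maxVal := by
          rw [smallSumSubset.eq_def, hdrop]; simp; omega
        exact ⟨hval.symm, memoOK_insert data maxVal memo i t maxVal hmem hval.symm⟩
  | succ fuel ih =>
    intro i t memo hfuel hmem
    rw [goB]
    by_cases ht : t ≤ 0
    · simp only [ht, if_true]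
      exact ⟨by rw [smallSumSubset.eq_def]; simp [ht], hmem⟩
    · simp only [ht, if_false]
      cases hget : PySem.Dict.get? memo (i, t) with
      | some v => exact ⟨hmem i t v hget, hmem⟩
      | none =>
        rw [pvSuff_getD]
        by_cases h1 : (data.drop i).sum < t
        · rw [if_pos h1]
          have hval : smallSumSubset (data.drop i) t maxVal = maxVal := by
            rw [smallSumSubset.eq_def]; simp [ht, h1]
          exact ⟨hval.symm, memoOK_insert data maxVal memo i t maxVal hmem hval.symm⟩
        · rw [if_neg h1]
          by_cases h2 : (data.drop i).sum = t
          · rw [if_pos h2]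
            have hile : i ≤ data.length := by
              by_contra hgt
              rw [List.drop_eq_nil_of_le (by omega)] at h2
              simp at h2; omega
            have hval : smallSumSubset (data.drop i) t maxVal
                = ((data.length : Int) - (i : Int)) := by
              rw [smallSumSubset.eq_def]
              simp [ht, h2, List.length_drop]
              omega
            exact ⟨hval.symm, memoOK_insert data maxVal memo i t _ hmem hval.symm⟩
          · rw [if_neg h2]
            have hpos : t < (data.drop i).sum := by omega
            have hi : i < data.length := by
              by_contra hgt
              rw [List.drop_eq_nil_of_le (by omega)] at hpos
              simp at hpos; omega
            have hgetd : data.getD i 0 = data[i] := List.getD_eq_getElem data 0 hi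
            have hstep := A_step data i t maxVal hi (by omega) hpos
            by_cases h3 : data.getD i 0 ≥ t
            · rw [if_pos h3]
              have hval : smallSumSubset (data.drop i) t maxVal = 1 := by
                rw [hstep, if_pos (hgetd ▸ h3)]
              exact ⟨hval.symm, memoOK_insert data maxVal memo i t 1 hmem hval.symm⟩
            · rw [if_neg h3]
              have hf1 : data.length - (i + 1) ≤ fuel := by omega
              obtain ⟨e1, m1ok⟩ := ih (i + 1) t memo hf1 hmem
              obtain ⟨e2, m2ok⟩ := ih (i + 1) (t - data.getD i 0) _ hf1 m1ok
              have hval : min (goB data (pvSuff data) data.length maxVal fuel (i + 1) t memo).1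
                    (1 + (goB data (pvSuff data) data.length maxVal fuel (i + 1)
                        (t - data.getD i 0)
                        (goB data (pvSuff data) data.length maxVal fuel (i + 1) t memo).2).1)
                  = smallSumSubset (data.drop i) t maxVal := by
                rw [e1, e2, hstep, if_neg (by rw [hgetd] at h3; omega), hgetd]
              exact ⟨hval, memoOK_insert data maxVal _ i t _ m2ok hval⟩

-- ===== VERDICT (by name: the statement is the Claim_ definition above) =====
theorem smallSumSubset_spec : Claim_equal_smallSumSubset := by
  intro data target maxVal _
  unfold Spec_smallSumSubset smallSumSubset_alt
  have h := (goB_correct data maxVal data.length 0 target PySem.Dict.empty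
      (by omega) (by intro i t v h; simp [PySem.Dict.get?_empty] at h)).1
  rw [h]; simp
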